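-- pv_equiv track=rewrite | github.com/BennoKrojer/ContraCAT | scripts/templates/utils.py | simple_cartesian_product
-- ===== SOURCE A (Python) =====
-- def simple_cartesian_product(set_a, set_b):
--     result = []
--     for i in range(0, len(set_a)):
--         for j in range(0, len(set_b)):
--
--             # for handling case having cartesian
--             # prodct first time of two sets
--             if type(set_a[i]) != list:
--                 set_a[i] = [set_a[i]]
--
--                 # coping all the members
--             # of set_a to temp
--             temp = [num for num in set_a[i]]
--
--             # add member of set_b to
--             # temp to have cartesian product
--             temp.append(set_b[j])
--             result.append(temp)
--
--     return result
-- ===== SOURCE B (Python) =====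
-- def simple_cartesian_product(set_a, set_b):
--     # one flat comprehension; no in-place normalization of set_a
--     # (A mutates set_a; equivalence is about the return value)
--     return [[a, b] for a in set_a for b in set_b]
-- ===== Notes on version B (the rewrite author's own statement) =====
-- stated objective: simpler
-- what changed: Replaced nested index loops with in-loop type guard, element copy and append by one flat pair comprehension producing [a, b] directly (and drops A's in-place mutation of set_a; return value only).
import Mathlib
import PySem

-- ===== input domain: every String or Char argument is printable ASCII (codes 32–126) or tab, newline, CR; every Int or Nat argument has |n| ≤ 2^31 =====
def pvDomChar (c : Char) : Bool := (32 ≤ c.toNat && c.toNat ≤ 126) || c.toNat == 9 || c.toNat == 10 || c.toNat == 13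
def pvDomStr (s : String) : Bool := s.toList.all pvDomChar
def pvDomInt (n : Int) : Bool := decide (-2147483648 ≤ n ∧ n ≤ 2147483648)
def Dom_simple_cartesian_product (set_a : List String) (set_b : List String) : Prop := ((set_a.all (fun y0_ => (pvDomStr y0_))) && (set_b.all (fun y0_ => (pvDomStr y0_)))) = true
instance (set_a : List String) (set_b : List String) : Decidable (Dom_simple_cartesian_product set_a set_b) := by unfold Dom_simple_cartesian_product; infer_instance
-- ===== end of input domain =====

-- B replaces A's nested index loops (guard, copy, append) by one flat pair comprehension,
-- for simplicity; A also mutates set_a in place (wraps elements in lists) — B does not,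
-- the equivalence proved here is about the RETURN value only.

-- ===== PORT A =====
-- Under the type convention set_a : List String, so Python's `type(set_a[i]) != list`
-- is always true and the element is wrapped into the singleton list; the in-place
-- mutation does not affect the returned value, which is built step for step below.
-- In-range indexing set_a[i]/set_b[j] is ported with pyGetD (indices produced by the
-- range loops are always in range, so the default is never used).
def simple_cartesian_product (set_a : List String) (set_b : List String) : List (List String) :=
  (PySem.List.pyRange 0 (set_a.length : Int) 1).foldl (fun result i =>
    (PySem.List.pyRange 0 (set_b.length : Int) 1).foldl (fun result j =>
      -- temp = [num for num in [set_a[i]]]; temp.append(set_b[j]); result.append(temp)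
      result ++ [[PySem.List.pyGetD set_a i "", PySem.List.pyGetD set_b j ""]]) result) []

-- ===== PORT B =====
def simple_cartesian_product_alt (set_a : List String) (set_b : List String) : List (List String) :=
  set_a.flatMap (fun a => set_b.map (fun b => [a, b]))

-- ===== PRECONDITION & SPEC =====
def Spec_simple_cartesian_product (set_a : List String) (set_b : List String) (out : List (List String)) : Prop := out = simple_cartesian_product_alt set_a set_b
instance (set_a : List String) (set_b : List String) (out : List (List String)) : Decidable (Spec_simple_cartesian_product set_a set_b out) := by unfold Spec_simple_cartesian_product; infer_instance

-- ===== CLAIM (what is proved, stated in full; the proofs are below) =====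
def Claim_equal_simple_cartesian_product : Prop := ∀ (set_a : List String) (set_b : List String), Dom_simple_cartesian_product set_a set_b → Spec_simple_cartesian_product set_a set_b (simple_cartesian_product set_a set_b)

-- ===== LEMMAS AND PROOFS =====

-- helper: the de-indexed double loop is the flat product
theorem scp_loop (sb : List String) (as : List String) (acc : List (List String)) :
    as.foldl (fun r a => sb.foldl (fun r b => r ++ [[a, b]]) r) acc
      = acc ++ as.flatMap (fun a => sb.map (fun b => [a, b])) := by
  induction as generalizing acc with
  | nil => simp
  | cons a as ih =>
    simp only [List.foldl_cons, List.flatMap_cons]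
    rw [PySem.List.foldl_append_singleton_eq_map, ih]
    simp

-- ===== VERDICT (by name: the statement is the Claim_ definition above) =====
theorem simple_cartesian_product_spec : Claim_equal_simple_cartesian_product := by
  intro set_a set_b _
  show simple_cartesian_product set_a set_b = simple_cartesian_product_alt set_a set_b
  unfold simple_cartesian_product simple_cartesian_product_alt
  rw [PySem.List.foldl_pyRange_zero_pyGetD' set_a ""
      (fun result a => (PySem.List.pyRange 0 (set_b.length : Int) 1).foldl
        (fun result j => result ++ [[a, PySem.List.pyGetD set_b j ""]]) result) []]
  have h : ∀ (a : String) (r : List (List String)),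
      (PySem.List.pyRange 0 (set_b.length : Int) 1).foldl
        (fun r j => r ++ [[a, PySem.List.pyGetD set_b j ""]]) r
      = set_b.foldl (fun r b => r ++ [[a, b]]) r :=
    fun a r => PySem.List.foldl_pyRange_zero_pyGetD' set_b "" (fun r b => r ++ [[a, b]]) r
  simp only [h]
  exact scp_loop set_b set_a []
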